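-- pv_equiv track=rewrite | github.com/jmshoun/braintree | braintree.py | _split_trees
-- ===== SOURCE A (Python) =====
-- def _split_trees(tree_lines):
--     trees = []
--     current_tree = []
--     for line in tree_lines[1:]:
--         if line.find("booster") == 0:
--             trees.append(current_tree)
--             current_tree = []
--         else:
--             current_tree.append(line)
--     trees.append(current_tree)
--     return trees
-- ===== SOURCE B (Python) =====
-- def _split_trees(tree_lines):
--     def go(lines):
--         for i, line in enumerate(lines):
--             if line.startswith("booster"):
--                 return [lines[:i]] + go(lines[i + 1:])
--         return [lines]
--     return go(tree_lines[1:])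
-- ===== Notes on version B (the rewrite author's own statement) =====
-- stated objective: alternative
-- what changed: Replaced A's single accumulate-and-flush loop by a recursive find-next-boundary-then-slice decomposition: scan for the first 'booster' line, emit the slice before it, and recurse on the remainder.
import Mathlib
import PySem

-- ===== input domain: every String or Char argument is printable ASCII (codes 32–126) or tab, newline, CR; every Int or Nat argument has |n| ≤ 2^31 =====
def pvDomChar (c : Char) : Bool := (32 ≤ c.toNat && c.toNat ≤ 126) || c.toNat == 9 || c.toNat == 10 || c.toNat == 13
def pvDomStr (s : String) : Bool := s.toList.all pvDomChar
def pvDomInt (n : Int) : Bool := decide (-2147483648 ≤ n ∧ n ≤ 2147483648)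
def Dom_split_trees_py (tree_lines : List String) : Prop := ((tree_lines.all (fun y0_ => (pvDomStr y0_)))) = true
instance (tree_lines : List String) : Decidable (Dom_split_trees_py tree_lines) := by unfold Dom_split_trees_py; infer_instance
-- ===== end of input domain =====

-- B replaces A's accumulate-and-flush loop by a recursive find-next-boundary-then-slice decomposition (alternative, same cost).

-- ===== PORT A =====
-- one step of A's for-loop over (trees, current_tree)
def pvStepA (st : List (List String) × List String) (line : String) :
    List (List String) × List String :=
  if PySem.Str.find line "booster" = 0 then (st.1 ++ [st.2], []) else (st.1, st.2 ++ [line])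

def split_trees_py (tree_lines : List String) : List (List String) :=
  let st := (PySem.List.slice tree_lines (some 1) none).foldl pvStepA ([], [])
  st.1 ++ [st.2]

-- ===== PORT B =====
-- B's enumerate-scan for the first line starting with "booster" (index of first match)
def pvFindB : List String → Option Nat
  | [] => none
  | l :: rest =>
    if PySem.Str.startswith l "booster" then some 0 else (pvFindB rest).map (· + 1)

theorem pvFindB_lt {lines : List String} {i : Nat} (h : pvFindB lines = some i) :
    i < lines.length := by
  induction lines generalizing i with
  | nil => simp [pvFindB] at h
  | cons l rest ih =>
    simp only [pvFindB] at h
    split at h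
    · simp only [Option.some.injEq] at h; simp [← h]
    · cases hr : pvFindB rest with
      | none => simp [hr] at h
      | some j =>
        simp [hr] at h
        have := ih hr
        simp [← h]; omega

-- B's go: slice before the first boundary, recurse after it
def pvGo (lines : List String) : List (List String) :=
  match h : pvFindB lines with
  | some i => lines.take i :: pvGo (lines.drop (i + 1))
  | none => [lines]
termination_by lines.length
decreasing_by
  have := pvFindB_lt h
  simp only [List.length_drop]; omega

def split_trees_py_alt (tree_lines : List String) : List (List String) :=
  pvGo (PySem.List.slice tree_lines (some 1) none)

-- ===== PRECONDITION & SPEC =====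
def Spec_split_trees_py (tree_lines : List String) (out : List (List String)) : Prop := out = split_trees_py_alt tree_lines
instance (tree_lines : List String) (out : List (List String)) : Decidable (Spec_split_trees_py tree_lines out) := by unfold Spec_split_trees_py; infer_instance

-- ===== CLAIM (what is proved, stated in full; the proofs are below) =====
def Claim_equal_split_trees_py : Prop := ∀ (tree_lines : List String), Dom_split_trees_py tree_lines → Spec_split_trees_py tree_lines (split_trees_py tree_lines)

-- ===== LEMMAS AND PROOFS =====

-- canonical splitter both programs compute (proof-only helper)
def pvSplit : List String → List (List String)
  | [] => [[]]
  | head :: rest =>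
    if PySem.Str.startswith head "booster" then
      [] :: pvSplit rest
    else
      let groups := pvSplit rest
      (head :: groups.headD []) :: groups.tail

theorem pvSplit_ne_nil (xs : List String) : pvSplit xs ≠ [] := by
  cases xs with
  | nil => simp [pvSplit]
  | cons h t => simp only [pvSplit]; split <;> simp

-- s.find(sub) == 0 is exactly s.startswith(sub)
theorem pvFind_zero_iff (cs p : List Char) : PySem.Chars.find cs p = 0 ↔ p <+: cs := by
  constructor
  · intro h
    have h0 : 0 ≤ PySem.Chars.find cs p := by omega
    have := (PySem.Chars.find_spec h0).1
    simpa [h] using this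
  · intro hp
    have h0 : 0 ≤ PySem.Chars.find cs p := (PySem.Chars.find_nonneg_iff cs p).2 hp.isInfix
    have hmin := (PySem.Chars.find_spec h0).2
    by_contra hne
    have hpos : 0 < (PySem.Chars.find cs p).toNat := by omega
    exact hmin 0 hpos (by simpa using hp)

theorem pvCond_iff (line : String) :
    (PySem.Str.find line "booster" = 0) ↔ PySem.Str.startswith line "booster" = true := by
  rw [PySem.Str.find_eq, PySem.Str.startswith_eq, pvFind_zero_iff, PySem.Chars.startswith_iff]

-- A's loop invariant: running A's loop from (trees, cur) yields pvSplit with cur merged into the first group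
theorem pvKeyA (body : List String) :
    ∀ (trees : List (List String)) (cur : List String),
      (body.foldl pvStepA (trees, cur)).1 ++ [(body.foldl pvStepA (trees, cur)).2] =
        trees ++ (cur ++ (pvSplit body).headD []) :: (pvSplit body).tail := by
  induction body with
  | nil => intro trees cur; simp [pvSplit]
  | cons l rest ih =>
    intro trees cur
    by_cases hb : PySem.Str.startswith l "booster" = true
    · have hf : PySem.Str.find l "booster" = 0 := (pvCond_iff l).2 hb
      simp only [List.foldl_cons, pvStepA, hf, pvSplit, if_pos hb]
      rw [ih]
      cases hg : pvSplit rest with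
      | nil => exact absurd hg (pvSplit_ne_nil rest)
      | cons g gs => simp
    · have hf : ¬ PySem.Str.find l "booster" = 0 := fun h => hb ((pvCond_iff l).1 h)
      simp only [List.foldl_cons, pvStepA, if_neg hf, pvSplit, if_neg hb]
      rw [ih]
      cases hg : pvSplit rest with
      | nil => exact absurd hg (pvSplit_ne_nil rest)
      | cons g gs => simp

-- if no line is a boundary, pvSplit yields a single group
theorem pvSplit_none {lines : List String} (h : pvFindB lines = none) :
    pvSplit lines = [lines] := by
  induction lines with
  | nil => simp [pvSplit]
  | cons l rest ih =>
    simp only [pvFindB] at h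
    split at h
    · simp at h
    · cases hr : pvFindB rest with
      | some j => simp [hr] at h
      | none =>
        rename_i hb
        rw [pvSplit, if_neg hb, ih hr]
        simp

-- if the first boundary is at i, pvSplit peels off the prefix before it
theorem pvSplit_some {lines : List String} {i : Nat} (h : pvFindB lines = some i) :
    pvSplit lines = lines.take i :: pvSplit (lines.drop (i + 1)) := by
  induction lines generalizing i with
  | nil => simp [pvFindB] at h
  | cons l rest ih =>
    simp only [pvFindB] at h
    split at h
    · rename_i hb
      simp only [Option.some.injEq] at h
      subst h
      rw [pvSplit, if_pos hb]
      simp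
    · rename_i hb
      cases hr : pvFindB rest with
      | none => simp [hr] at h
      | some j =>
        simp only [hr, Option.map_some, Option.some.injEq] at h
        subst h
        rw [pvSplit, if_neg hb, ih hr]
        simp

theorem pvKeyB (lines : List String) : pvGo lines = pvSplit lines := by
  induction lines using pvGo.induct with
  | case1 lines i h ih =>
    rw [pvGo]
    split
    · rename_i j hj
      rw [hj] at h
      injection h with h
      subst h
      rw [ih, pvSplit_some hj]
    · rename_i hn
      rw [hn] at h
      exact absurd h (by simp)
  | case2 lines h =>
    rw [pvGo]
    split
    · rename_i j hj
      rw [hj] at h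
      exact absurd h (by simp)
    · rw [pvSplit_none h]

-- ===== VERDICT (by name: the statement is the Claim_ definition above) =====
theorem split_trees_py_spec : Claim_equal_split_trees_py := by
  intro tree_lines _
  unfold Spec_split_trees_py split_trees_py split_trees_py_alt
  rw [pvKeyA, pvKeyB]
  cases hg : pvSplit (PySem.List.slice tree_lines (some 1) none) with
  | nil => exact absurd hg (pvSplit_ne_nil _)
  | cons g gs => simp
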